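-- pv_equiv track=rewrite | github.com/TheTrveAnthony/faceless | functions.py | reverse_rgb
-- ===== SOURCE A (Python) =====
-- def reverse_rgb(x):
--
-- 	""" This function returns a rgb value as an array from a
-- 		digit between 0 and 16777215, to do so the digit is decomposed  as a
-- 		255 base number.
--
-- 	Variables index :
-- 		x : The digit we gotta convert
-- 		rgb : The returned array containing a rgb value
-- 		v : The values used to fill the array
-- 	"""
--
-- 	rgb = []
-- 	i = 0
-- 	while len(rgb) != 3:
--
-- 		if len(rgb) == 2:
-- 			rgb.append(x)
--
-- 		else:
-- 			k = 0
--
-- 			while k*256**(2-i) < x: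
--
-- 				k += 1
--
-- 			if k == 0 :
--
-- 				v = k
--
-- 			else:
--
-- 				v = k - 1
--
-- 			rgb.append(v)
-- 			x -= v*256**(2-i)
-- 			i += 1
--
-- 	return rgb
-- ===== SOURCE B (Python) =====
-- def reverse_rgb(x):
--     """Direct closed-form digit extraction: no inner search loops.
--
--     Each of the first two digits is ceil(x/base)-1 when x > 0 (matching the
--     'smallest k with k*base >= x, minus one' search) and 0 otherwise; the
--     remainder becomes the third element.  Ceiling division is done with
--     integer arithmetic: -((-x)//base).
--     """
--     rgb = []
--     for base in (65536, 256):
--         v = -((-x) // base) - 1 if x > 0 else 0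
--         rgb.append(v)
--         x -= v * base
--     rgb.append(x)
--     return rgb
-- ===== Notes on version B (the rewrite author's own statement) =====
-- stated objective: simpler
-- what changed: Both inner linear searches for the smallest k with k*base >= x are replaced by a direct closed-form digit v = -((-x)//base) - 1 (integer ceiling division) when x > 0 else 0, computed in a single pass over the two bases.
import Mathlib
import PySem

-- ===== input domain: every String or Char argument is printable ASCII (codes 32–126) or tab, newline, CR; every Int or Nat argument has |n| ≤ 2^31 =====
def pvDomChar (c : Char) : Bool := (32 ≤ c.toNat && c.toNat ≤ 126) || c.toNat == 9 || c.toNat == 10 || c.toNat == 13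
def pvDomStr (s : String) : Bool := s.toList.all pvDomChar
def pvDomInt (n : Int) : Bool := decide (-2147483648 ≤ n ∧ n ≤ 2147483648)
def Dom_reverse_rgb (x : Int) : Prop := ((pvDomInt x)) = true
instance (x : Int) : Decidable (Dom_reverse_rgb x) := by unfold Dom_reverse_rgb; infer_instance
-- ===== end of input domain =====

-- B replaces A's inner linear search for each digit by a closed-form integer
-- ceiling division (simpler: no search loops, each digit computed directly).

-- ===== PORT A =====
-- inner loop 'while k*256**(2-i) < x: k += 1'
def pvFindK (x : Int) (e : Nat) (k : Int) : Int :=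
  if k * 256 ^ e < x then pvFindK x e (k + 1) else k
termination_by (x - k * 256 ^ e).toNat
decreasing_by
  have hb : (1 : Int) ≤ 256 ^ e := one_le_pow₀ (by norm_num)
  have : (k + 1) * 256 ^ e = k * 256 ^ e + 256 ^ e := by ring
  omega

-- outer loop 'while len(rgb) != 3': rgb grows by exactly one element per pass,
-- so it is entered only with len(rgb) < 3; rendered as recursion on 3 - len(rgb)
def pvRgbLoop (x : Int) (rgb : List Int) (i : Nat) : List Int :=
  if rgb.length < 3 then
    if rgb.length = 2 then
      pvRgbLoop x (rgb ++ [x]) i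
    else
      let k := pvFindK x (2 - i) 0
      let v := if k = 0 then k else k - 1
      pvRgbLoop (x - v * 256 ^ (2 - i)) (rgb ++ [v]) (i + 1)
  else rgb
termination_by 3 - rgb.length
decreasing_by all_goals simp; omega

def reverse_rgb (x : Int) : List Int := pvRgbLoop x [] 0

-- ===== PORT B =====
-- 'for base in (65536, 256)': digit v = -((-x) // base) - 1 if x > 0 else 0,
-- then x -= v * base; finally append the remainder
def reverse_rgb_alt (x : Int) : List Int :=
  let st := [(65536 : Int), 256].foldl
    (fun (st : Int × List Int) (base : Int) =>
      let v := if st.1 > 0 then -(PySem.Int.floordiv (-st.1) base) - 1 else 0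
      (st.1 - v * base, st.2 ++ [v]))
    (x, [])
  st.2 ++ [st.1]

-- ===== PRECONDITION & SPEC =====
def Spec_reverse_rgb (x : Int) (out : List Int) : Prop := out = reverse_rgb_alt x
instance (x : Int) (out : List Int) : Decidable (Spec_reverse_rgb x out) := by unfold Spec_reverse_rgb; infer_instance

-- ===== CLAIM (what is proved, stated in full; the proofs are below) =====
def Claim_equal_reverse_rgb : Prop := ∀ (x : Int), Dom_reverse_rgb x → Spec_reverse_rgb x (reverse_rgb x)

-- ===== LEMMAS AND PROOFS =====

-- the common closed form of one digit: ceil(x/b) - 1 for positive x, else 0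
def pvD (x b : Int) : Int := if 0 < x then -(PySem.Int.floordiv (-x) b) - 1 else 0

-- A's inner search from k computes max k (ceil(x/256^e)) — stated for k = 0 uses
lemma pvFindK_eq (x : Int) (e : Nat) (k : Int) :
    pvFindK x e k =
      if x ≤ k * 256 ^ e then k else -(PySem.Int.floordiv (-x) (256 ^ e)) := by
  have hb : (0 : Int) < 256 ^ e := by positivity
  fun_induction pvFindK x e k with
  | case1 k h ih =>
    have hk1 : (k + 1) * 256 ^ e = k * 256 ^ e + 256 ^ e := by ring
    rw [ih, if_neg (by omega : ¬ x ≤ k * 256 ^ e)]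
    by_cases h2 : x ≤ (k + 1) * 256 ^ e
    · rw [if_pos h2]
      have hk0 : (k + 1 - 1) * 256 ^ e = k * 256 ^ e := by ring
      exact ((PySem.Int.neg_floordiv_neg_eq_iff_of_pos hb).2 ⟨by omega, h2⟩).symm
    · rw [if_neg h2]
  | case2 k h => rw [if_pos (by omega)]

-- A's 'v = k if k == 0 else k - 1' equals the closed-form digit
lemma A_step (x : Int) (e : Nat) :
    (if pvFindK x e 0 = 0 then pvFindK x e 0 else pvFindK x e 0 - 1) = pvD x (256 ^ e) := by
  have hb : (0 : Int) < 256 ^ e := by positivity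
  rw [pvFindK_eq, pvD]
  by_cases hx : 0 < x
  · have h0 : ¬ x ≤ 0 * 256 ^ e := by omega
    rw [if_neg h0, if_pos hx]
    have hcb := (PySem.Int.neg_floordiv_neg_eq_iff_of_pos (a := x) hb).1 rfl
    have hne : -(PySem.Int.floordiv (-x) (256 ^ e)) ≠ 0 := by nlinarith [hcb.2]
    rw [if_neg hne]
  · have h0 : x ≤ 0 * 256 ^ e := by omega
    rw [if_pos h0, if_neg hx]
    simp

lemma A_closed (x : Int) :
    reverse_rgb x =
      [pvD x 65536, pvD (x - pvD x 65536 * 65536) 256,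
       (x - pvD x 65536 * 65536) - pvD (x - pvD x 65536 * 65536) 256 * 256] := by
  unfold reverse_rgb
  rw [pvRgbLoop]
  simp only [List.length_nil, Nat.reduceSub]
  rw [A_step x 2]
  norm_num
  rw [pvRgbLoop]
  simp only [List.length_cons, List.length_nil, Nat.reduceSub]
  rw [A_step _ 1]
  norm_num
  rw [pvRgbLoop]
  simp only [List.length_cons, List.length_nil]
  rw [pvRgbLoop]
  simp only [List.length_cons, List.length_nil, List.length_append]
  norm_num

lemma B_closed (x : Int) :
    reverse_rgb_alt x =
      [pvD x 65536, pvD (x - pvD x 65536 * 65536) 256,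
       (x - pvD x 65536 * 65536) - pvD (x - pvD x 65536 * 65536) 256 * 256] := by
  simp [reverse_rgb_alt, List.foldl, pvD]

-- ===== VERDICT (by name: the statement is the Claim_ definition above) =====
theorem reverse_rgb_spec : Claim_equal_reverse_rgb := by
  intro x _
  exact (A_closed x).trans (B_closed x).symm
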